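-- pv_equiv track=rewrite | github.com/docnyberg/uap-orb-site | tools/decode_prep.py | rotate_to_match_order
-- ===== SOURCE A (Python) =====
-- from typing import List, Tuple, Optional, Dict, Any
--
-- def rotation_index_to_match(target: List[str], pattern: List[str]) -> Optional[int]:
--     """Return rotation index r s.t. rotate(pattern,r) == target, else None."""
--     if len(target) != len(pattern):
--         return None
--     for r in range(len(pattern)):
--         if all(pattern[(i + r) % len(pattern)] == target[i] for i in range(len(pattern))):
--             return r
--     return None
--
-- def rotate_to_match_order(rle_colors: List[str], order4: List[str]) -> Tuple[List[str], Optional[int]]: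
--     """
--     If rle_colors contains the 4 colors in the same cyclic order (any rotation),
--     rotate so that the first 4 entries align to order4. Return (rotated_list, rotation_index)
--     or (original, None) if not matched.
--     """
--     if not rle_colors or not order4:
--         return rle_colors, None
--     # try all rotations of rle_colors and check the first 4 steps
--     for r in range(len(rle_colors)):
--         rl = rle_colors[r:] + rle_colors[:r]
--         if len(rl) >= 4:
--             first4 = rl[:4]
--             # ensure 4 distinct in first4
--             if len(set(first4)) == 4:
--                 # does first4 match order4 up to rotation?
--                 rot = rotation_index_to_match(first4, order4)
--                 if rot is not None:
--                     # additionally, ensure the rest of rl doesn't immediately break the cycle (optional)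
--                     return rl, r
--     return rle_colors, None
-- ===== SOURCE B (Python) =====
-- from typing import List, Tuple, Optional
--
-- def rotate_to_match_order(rle_colors: List[str], order4: List[str]) -> Tuple[List[str], Optional[int]]:
--     n = len(rle_colors)
--     if n == 0 or n < 4 or len(order4) != 4:
--         return rle_colors, None
--     # the four rotations of order4, precomputed once
--     rots = [order4[k:] + order4[:k] for k in range(4)]
--     for r in range(n):
--         first4 = [rle_colors[(r + i) % n] for i in range(4)]
--         if len(set(first4)) == 4 and first4 in rots:
--             return rle_colors[r:] + rle_colors[:r], r
--     return rle_colors, None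
-- ===== Notes on version B (the rewrite author's own statement) =====
-- stated objective: faster
-- what changed: B precomputes the four rotations of order4 once and, for each candidate r, indexes only the four elements rle_colors[(r+i)%n] instead of materialising the full rotated list per r; the rotated list is built only for the returned match.
import Mathlib
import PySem

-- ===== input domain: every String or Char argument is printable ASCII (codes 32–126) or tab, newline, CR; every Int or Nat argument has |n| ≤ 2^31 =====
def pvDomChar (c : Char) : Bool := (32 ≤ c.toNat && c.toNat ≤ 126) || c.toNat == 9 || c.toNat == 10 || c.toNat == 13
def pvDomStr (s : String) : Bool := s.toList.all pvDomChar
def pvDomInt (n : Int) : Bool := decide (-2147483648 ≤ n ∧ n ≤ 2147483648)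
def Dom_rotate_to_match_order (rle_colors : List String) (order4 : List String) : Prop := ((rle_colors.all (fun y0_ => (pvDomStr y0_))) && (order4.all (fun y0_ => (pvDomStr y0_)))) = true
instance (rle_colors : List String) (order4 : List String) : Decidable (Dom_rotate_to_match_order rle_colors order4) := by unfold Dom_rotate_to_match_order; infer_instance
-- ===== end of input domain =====

-- B replaces A's per-rotation full-list rebuild + rotation scan by a precomputed list of the
-- four rotations of order4 and direct indexing of the four candidate elements (objective: faster).

-- ===== PORT A =====
-- inner 'all(...)' of rotation_index_to_match; indices (i+r) % len are always in range, so
-- the Option comparison of pyGet? values is exact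
def rim_check (target pattern : List String) (r : Int) : Bool :=
  (PySem.List.pyRange 0 pattern.length 1).all (fun i =>
    PySem.List.pyGet? pattern (PySem.Int.mod (i + r) pattern.length) == PySem.List.pyGet? target i)

-- 'for r in range(len(pattern)): …'
def rim_loop (target pattern : List String) : List Int → Option Int
  | [] => none
  | r :: rs => if rim_check target pattern r then some r else rim_loop target pattern rs

def rotation_index_to_match (target pattern : List String) : Option Int :=
  if target.length ≠ pattern.length then none
  else rim_loop target pattern (PySem.List.pyRange 0 pattern.length 1)

-- 'for r in range(len(rle_colors)): …'
def rtm_loopA (rle_colors order4 : List String) : List Int → List String × Option Int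
  | [] => (rle_colors, none)
  | r :: rs =>
    let rl := PySem.List.slice rle_colors (some r) none ++ PySem.List.slice rle_colors none (some r)
    if 4 ≤ rl.length then
      let first4 := PySem.List.slice rl none (some 4)
      if PySem.Set.len (PySem.Set.ofList first4) = 4 then
        match rotation_index_to_match first4 order4 with
        | some _ => (rl, some r)
        | none => rtm_loopA rle_colors order4 rs
      else rtm_loopA rle_colors order4 rs
    else rtm_loopA rle_colors order4 rs

def rotate_to_match_order (rle_colors : List String) (order4 : List String) : List String × Option Int :=
  if rle_colors = [] ∨ order4 = [] then (rle_colors, none)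
  else rtm_loopA rle_colors order4 (PySem.List.pyRange 0 rle_colors.length 1)

-- ===== PORT B =====
-- '[order4[k:] + order4[:k] for k in range(4)]'
def rtm_rots (order4 : List String) : List (List String) :=
  (PySem.List.pyRange 0 4 1).map (fun k =>
    PySem.List.slice order4 (some k) none ++ PySem.List.slice order4 none (some k))

-- 'for r in range(n): …'; the index (r+i) % n is always in range (n ≥ 4), so pyGetD is exact
def rtm_loopB (rle_colors : List String) (n : Int) (rots : List (List String)) : List Int → List String × Option Int
  | [] => (rle_colors, none)
  | r :: rs =>
    let first4 := (PySem.List.pyRange 0 4 1).map (fun i =>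
      PySem.List.pyGetD rle_colors (PySem.Int.mod (r + i) n) "")
    if PySem.Set.len (PySem.Set.ofList first4) = 4 ∧ rots.contains first4 then
      (PySem.List.slice rle_colors (some r) none ++ PySem.List.slice rle_colors none (some r), some r)
    else rtm_loopB rle_colors n rots rs

def rotate_to_match_order_alt (rle_colors : List String) (order4 : List String) : List String × Option Int :=
  let n : Int := rle_colors.length
  if n = 0 ∨ n < 4 ∨ order4.length ≠ 4 then (rle_colors, none)
  else rtm_loopB rle_colors n (rtm_rots order4) (PySem.List.pyRange 0 n 1)

-- ===== PRECONDITION & SPEC =====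
def Spec_rotate_to_match_order (rle_colors : List String) (order4 : List String) (out : List String × Option Int) : Prop := out = rotate_to_match_order_alt rle_colors order4
instance (rle_colors : List String) (order4 : List String) (out : List String × Option Int) : Decidable (Spec_rotate_to_match_order rle_colors order4 out) := by unfold Spec_rotate_to_match_order; infer_instance

-- ===== CLAIM (what is proved, stated in full; the proofs are below) =====
def Claim_equal_rotate_to_match_order : Prop := ∀ (rle_colors : List String) (order4 : List String), Dom_rotate_to_match_order rle_colors order4 → Spec_rotate_to_match_order rle_colors order4 (rotate_to_match_order rle_colors order4)

-- ===== LEMMAS AND PROOFS =====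
lemma pyRange4 : PySem.List.pyRange 0 4 1 = [0,1,2,3] := by decide

lemma rl_len (xs : List String) (r : Int) (h0 : 0 ≤ r) (h1 : r < (xs.length : Int)) :
    (PySem.List.slice xs (some r) none ++ PySem.List.slice xs none (some r)).length = xs.length := by
  rw [PySem.List.slice_from xs h0, PySem.List.slice_to xs h0]
  simp
  omega


lemma rot_getD (xs : List String) (k m : Nat) (hk : k ≤ xs.length) (hm : m < xs.length) :
    (xs.drop k ++ xs.take k).getD m "" = xs.getD ((k + m) % xs.length) "" := by
  have hlen : (xs.drop k).length = xs.length - k := by simp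
  rcases lt_or_ge m (xs.length - k) with h | h
  · rw [List.getD_eq_getElem _ _ (by simp; omega), List.getElem_append_left (by omega),
      List.getElem_drop]
    rw [List.getD_eq_getElem _ _ (Nat.mod_lt _ (by omega))]
    congr 1
    rw [Nat.mod_eq_of_lt (by omega)]
  · rw [List.getD_eq_getElem _ _ (by simp; omega), List.getElem_append_right (by omega)]
    rw [List.getD_eq_getElem _ _ (Nat.mod_lt _ (by omega))]
    have h2 : (k + m) % xs.length = m - (xs.length - k) := by
      rw [Nat.mod_eq_sub_mod (by omega), Nat.mod_eq_of_lt (by omega)]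
      omega
    simp only [List.getElem_take]
    congr 1
    simp [hlen]
    omega

lemma take4_eq (ys : List String) (h : 4 ≤ ys.length) :
    ys.take 4 = [ys.getD 0 "", ys.getD 1 "", ys.getD 2 "", ys.getD 3 ""] := by
  rcases ys with _|⟨a,_|⟨b,_|⟨c,_|⟨d,t⟩⟩⟩⟩ <;> simp_all

lemma first4_eq (xs : List String) (r : Int) (h0 : 0 ≤ r) (h1 : r < (xs.length : Int))
    (h4 : 4 ≤ xs.length) :
    PySem.List.slice (PySem.List.slice xs (some r) none ++ PySem.List.slice xs none (some r)) none (some 4) =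
    (PySem.List.pyRange 0 4 1).map (fun i => PySem.List.pyGetD xs (PySem.Int.mod (r + i) (xs.length : Int)) "") := by
  rw [pyRange4, PySem.List.slice_from xs h0, PySem.List.slice_to xs h0]
  set ys := xs.drop r.toNat ++ xs.take r.toNat with hys
  have hto : PySem.List.slice ys none (some 4) = ys.take 4 := by
    have := PySem.List.slice_to ys (show (0:Int) ≤ 4 by norm_num)
    simpa using this
  rw [hto]
  have hn : (0:Int) < (xs.length : Int) := by omega
  have key : ∀ i : Int, 0 ≤ i → i < 4 →
      PySem.List.pyGetD xs (PySem.Int.mod (r + i) (xs.length : Int)) "" = ys.getD i.toNat "" := by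
    intro i hi0 hi4
    rw [PySem.Int.mod_eq_emod_of_pos hn]
    have hlt := Int.emod_lt_of_pos (r + i) hn
    have hge := Int.emod_nonneg (r + i) (show (xs.length:Int) ≠ 0 by omega)
    rw [PySem.List.pyGetD_eq_getElem _ _ hge hlt]
    rw [hys, rot_getD xs r.toNat i.toNat (by omega) (by omega)]
    rw [← List.getD_eq_getElem xs _ (by omega)]
    congr 1
    have hsplit : (r + i) % (xs.length : Int) =
        if r + i < (xs.length : Int) then r + i else r + i - (xs.length : Int) := by
      rcases lt_or_ge (r + i) (xs.length : Int) with h | h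
      · rw [if_pos h]; exact Int.emod_eq_of_lt (by omega) h
      · rw [if_neg (by omega), ← Int.sub_emod_right (r + i) (xs.length : Int)]
        exact Int.emod_eq_of_lt (by omega) (by omega)
    rw [hsplit]
    split_ifs with h
    · rw [Nat.mod_eq_of_lt (by omega)]; omega
    · rw [Nat.mod_eq_sub_mod (by omega), Nat.mod_eq_of_lt (by omega)]; omega
  have hylen : 4 ≤ ys.length := by simp [hys]; omega
  rw [take4_eq ys hylen]
  simp only [List.map_cons, List.map_nil]
  rw [key 0 (by norm_num) (by norm_num), key 1 (by norm_num) (by norm_num),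
     key 2 (by norm_num) (by norm_num), key 3 (by norm_num) (by norm_num)]
  rfl

lemma rim_none_iff (f4 ord : List String) (hf : f4.length = 4) (ho : ord.length = 4) :
    (rotation_index_to_match f4 ord = none) ↔ ((rtm_rots ord).contains f4 = false) := by
  rcases f4 with _|⟨w,_|⟨x,_|⟨y,_|⟨z,_|⟨w5,t⟩⟩⟩⟩⟩ <;> simp_all
  rcases ord with _|⟨a,_|⟨b,_|⟨c,_|⟨d,_|⟨a5,t⟩⟩⟩⟩⟩ <;> simp_all
  simp [rotation_index_to_match, rim_loop, rim_check, rtm_rots, pyRange4,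
    PySem.Int.mod, PySem.List.pyGet?, PySem.List.pyIdx?, PySem.List.slice,
    List.all]
  split_ifs <;> simp_all [eq_comm]

lemma loopA_short (xs ord : List String) (h : xs.length < 4) :
    ∀ rs, (∀ r ∈ rs, 0 ≤ r ∧ r < (xs.length : Int)) → rtm_loopA xs ord rs = (xs, none) := by
  intro rs
  induction rs with
  | nil => intro _; simp [rtm_loopA]
  | cons r rs ih =>
    intro hmem
    obtain ⟨hr0, hr1⟩ := hmem r (by simp)
    simp only [rtm_loopA]
    rw [rl_len xs r hr0 hr1, if_neg (by omega)]
    exact ih (fun r hr => hmem r (by simp [hr]))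

lemma loopA_badlen (xs ord : List String) (h4 : 4 ≤ xs.length) (ho : ord.length ≠ 4) :
    ∀ rs, (∀ r ∈ rs, 0 ≤ r ∧ r < (xs.length : Int)) → rtm_loopA xs ord rs = (xs, none) := by
  intro rs
  induction rs with
  | nil => intro _; simp [rtm_loopA]
  | cons r rs ih =>
    intro hmem
    obtain ⟨hr0, hr1⟩ := hmem r (by simp)
    have hrl : (PySem.List.slice xs (some r) none ++ PySem.List.slice xs none (some r)).length = xs.length :=
      rl_len xs r hr0 hr1
    have hf4 : (PySem.List.slice (PySem.List.slice xs (some r) none ++ PySem.List.slice xs none (some r)) none (some 4)).length = 4 := by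
      have := PySem.List.slice_to (PySem.List.slice xs (some r) none ++ PySem.List.slice xs none (some r)) (show (0:Int) ≤ 4 by norm_num)
      rw [this]
      simp [hrl]
      omega
    have hrim : rotation_index_to_match (PySem.List.slice (PySem.List.slice xs (some r) none ++ PySem.List.slice xs none (some r)) none (some 4)) ord = none := by
      rw [rotation_index_to_match, if_pos (by omega)]
    simp only [rtm_loopA]
    rw [hrl, if_pos (by omega)]
    split_ifs with hd
    · rw [hrim]
      exact ih (fun r hr => hmem r (by simp [hr]))
    · exact ih (fun r hr => hmem r (by simp [hr]))

lemma loop_eq (xs ord : List String) (h4 : 4 ≤ xs.length) (ho : ord.length = 4) :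
    ∀ rs, (∀ r ∈ rs, 0 ≤ r ∧ r < (xs.length : Int)) →
      rtm_loopA xs ord rs = rtm_loopB xs (xs.length : Int) (rtm_rots ord) rs := by
  intro rs
  induction rs with
  | nil => intro _; simp [rtm_loopA, rtm_loopB]
  | cons r rs ih =>
    intro hmem
    obtain ⟨hr0, hr1⟩ := hmem r (by simp)
    have ih' := ih (fun r hr => hmem r (by simp [hr]))
    simp only [rtm_loopA, rtm_loopB]
    rw [rl_len xs r hr0 hr1, if_pos (by omega), first4_eq xs r hr0 hr1 h4]
    set f4 := (PySem.List.pyRange 0 4 1).map (fun i => PySem.List.pyGetD xs (PySem.Int.mod (r + i) (xs.length : Int)) "") with hf4def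
    have hf4len : f4.length = 4 := by rw [hf4def, List.length_map, pyRange4]; rfl
    by_cases hd : PySem.Set.len (PySem.Set.ofList f4) = 4
    · cases hrim : rotation_index_to_match f4 ord with
      | none =>
        have hc : (rtm_rots ord).contains f4 = false := (rim_none_iff f4 ord hf4len ho).mp hrim
        have hc' : f4 ∉ rtm_rots ord := by simpa using hc
        rw [if_pos hd, if_neg (by simp [hc'])]
        exact ih'
      | some k =>
        have hc : (rtm_rots ord).contains f4 = true := by
          rcases hcc : (rtm_rots ord).contains f4 with _ | _
          · rw [(rim_none_iff f4 ord hf4len ho).mpr hcc] at hrim; cases hrim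
          · rfl
        have hc' : f4 ∈ rtm_rots ord := by simpa using hc
        rw [if_pos hd, if_pos ⟨hd, by simpa using hc'⟩]
    · rw [if_neg hd, if_neg (fun hcond => hd hcond.1)]
      exact ih'


-- ===== VERDICT (by name: the statement is the Claim_ definition above) =====
theorem rotate_to_match_order_spec : Claim_equal_rotate_to_match_order := by
  intro xs ord _hdom
  show rotate_to_match_order xs ord = rotate_to_match_order_alt xs ord
  unfold rotate_to_match_order rotate_to_match_order_alt
  by_cases hx : xs = []
  · rw [if_pos (Or.inl hx), if_pos (by simp [hx])]
  · by_cases hor : ord = []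
    · rw [if_pos (Or.inr hor), if_pos (by simp [hor])]
    · rw [if_neg (by tauto)]
      have hmem : ∀ r ∈ PySem.List.pyRange 0 (xs.length : Int) 1, 0 ≤ r ∧ r < (xs.length : Int) := by
        intro r hr
        rw [PySem.List.mem_pyRange_one] at hr
        exact hr
      by_cases h4 : 4 ≤ xs.length
      · by_cases ho : ord.length = 4
        · rw [if_neg (by simp [ho]; exact ⟨hx, h4⟩)]
          exact loop_eq xs ord h4 ho _ hmem
        · rw [loopA_badlen xs ord h4 ho _ hmem, if_pos (by right; right; simpa using ho)]
      · rw [loopA_short xs ord (by omega) _ hmem, if_pos (by right; left; omega)]
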